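-- pv_equiv track=rewrite | github.com/MKSonny/Algorithm | 프로그래머스/연습문제 Lv2/PCCP 외톨이 알파벳 11_27.py | solution
-- ===== SOURCE A (Python) =====
-- def solution(input_string):
--     answer = []
--     al = list(set(input_string))
--     d = {}
--     for i in al:
--         d[i] = []
--     for idx, i in enumerate(input_string):
--         d[i].append(idx)
--
--     for k in d:
--         for i in range(len(d[k]) - 1):
--             if d[k][i] != d[k][i + 1] - 1:
--                 answer.append(k)
--
--     answer = list(set(answer))
--
--     if len(answer) == 0:
--         return 'N'
--
--     answer.sort()
--     answer = ''.join(answer)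
--
--     return answer
-- ===== SOURCE B (Python) =====
-- def solution(input_string):
--     prev = None
--     started = set()
--     outliers = set()
--     for c in input_string:
--         if c != prev:
--             if c in started:
--                 outliers.add(c)
--             else:
--                 started.add(c)
--         prev = c
--     if not outliers:
--         return 'N'
--     return ''.join(sorted(outliers))
-- ===== Notes on version B (the rewrite author's own statement) =====
-- stated objective: simpler
-- what changed: Replaced the dict of per-character index lists plus a gap scan over each list with one left-to-right pass that tracks run boundaries in two sets (started, outliers).
import Mathlib
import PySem

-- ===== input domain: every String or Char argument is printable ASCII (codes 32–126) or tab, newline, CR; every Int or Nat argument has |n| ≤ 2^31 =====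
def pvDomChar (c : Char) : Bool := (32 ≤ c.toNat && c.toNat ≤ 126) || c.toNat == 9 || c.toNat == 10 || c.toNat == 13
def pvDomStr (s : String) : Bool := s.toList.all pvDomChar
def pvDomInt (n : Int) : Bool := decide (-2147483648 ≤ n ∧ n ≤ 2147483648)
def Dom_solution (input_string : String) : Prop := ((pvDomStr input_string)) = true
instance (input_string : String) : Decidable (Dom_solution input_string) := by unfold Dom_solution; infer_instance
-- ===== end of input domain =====

-- B replaces A's dict of per-character index lists + gap scan with one pass tracking run starts; same return value, proved equal.


-- ===== PORT A =====
-- Python A iterates over set/dict hash order, but the resulting list is deduplicated and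
-- sorted before being returned, so the result is order-independent; we model the set/dict
-- in first-occurrence order.  'answer.sort(); ''.join(answer)' on single-char strings is
-- sorting the chars by codepoint and packing them into a string.
def solution (input_string : String) : String :=
  let s := input_string.toList
  let al := PySem.Set.ofList s
  let d0 := al.foldl (fun d i => d.insert i ([] : List Int)) PySem.Dict.empty
  let d := (PySem.List.enumerate s 0).foldl (fun dd p => dd.modify p.2 [] (· ++ [p.1])) d0
  let answer := d.keys.foldl (fun ans k =>
    (PySem.List.pyRange 0 (((d.getD k []).length : Int) - 1) 1).foldl
      (fun ans2 i =>
        if PySem.List.pyGetD (d.getD k []) i 0 ≠ PySem.List.pyGetD (d.getD k []) (i + 1) 0 - 1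
        then ans2 ++ [k] else ans2) ans) ([] : List Char)
  let answer2 := PySem.Set.ofList answer
  if answer2.length = 0 then "N"
  else String.ofList (PySem.List.sorted answer2 (fun x => x) false)

-- ===== PORT B =====
-- the loop of Source B: state (prev, started, outliers); returns the final (started, outliers)
def solAltLoop : List Char → Option Char → PySem.Set Char → PySem.Set Char →
    PySem.Set Char × PySem.Set Char
  | [], _, started, outliers => (started, outliers)
  | c :: t, prev, started, outliers =>
    if some c = prev then solAltLoop t (some c) started outliers
    else if PySem.Set.contains started c then solAltLoop t (some c) started (PySem.Set.add outliers c)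
    else solAltLoop t (some c) (PySem.Set.add started c) outliers

def solution_alt (input_string : String) : String :=
  let out := (solAltLoop input_string.toList none PySem.Set.empty PySem.Set.empty).2
  if out = [] then "N"
  else String.ofList (PySem.List.sorted out (fun x => x) false)

-- ===== PRECONDITION & SPEC =====
def Spec_solution (input_string : String) (out : String) : Prop := out = solution_alt input_string
instance (input_string : String) (out : String) : Decidable (Spec_solution input_string out) := by unfold Spec_solution; infer_instance

-- ===== CLAIM (what is proved, stated in full; the proofs are below) =====
def Claim_equal_solution : Prop := ∀ (input_string : String), Dom_solution input_string → Spec_solution input_string (solution input_string)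

-- ===== LEMMAS AND PROOFS =====

-- the sequence of run-start characters of s, given the character preceding s
def runStarts : List Char → Option Char → List Char
  | [], _ => []
  | c :: t, prev => if some c = prev then runStarts t prev else c :: runStarts t (some c)

lemma mem_runStarts {t : List Char} {p : Option Char} {c : Char} (hp : p ≠ some c) :
    c ∈ runStarts t p ↔ c ∈ t := by
  induction t generalizing p with
  | nil => simp [runStarts]
  | cons x t ih =>
    simp only [runStarts]
    by_cases hxp : (some x : Option Char) = p
    · have hx : x ≠ c := by rintro rfl; exact hp hxp.symm
      rw [if_pos hxp, ih hp, List.mem_cons]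
      exact ⟨Or.inr, fun h => h.elim (fun h' => absurd h'.symm hx) id⟩
    · rw [if_neg hxp]
      by_cases hx : x = c
      · subst hx; simp
      · rw [List.mem_cons, List.mem_cons, ih (fun h => hx (by simpa using h))]

lemma subset_runStarts {t : List Char} {p : Option Char} {c : Char} :
    c ∈ runStarts t p → c ∈ t := by
  induction t generalizing p with
  | nil => simp [runStarts]
  | cons x t ih =>
    simp only [runStarts]
    by_cases hxp : (some x : Option Char) = p
    · rw [if_pos hxp]; intro h; exact .tail _ (ih h)
    · rw [if_neg hxp]
      intro h
      rcases List.mem_cons.1 h with rfl | h'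
      · simp
      · exact .tail _ (ih h')

-- positions (indices, offset n) of c in s
def posOf (c : Char) (s : List Char) (n : Int) : List Int :=
  ((PySem.List.enumerate s n).filter (fun p => p.2 == c)).map (·.1)

lemma posOf_nil (c : Char) (n : Int) : posOf c [] n = [] := rfl

lemma posOf_cons (c x : Char) (t : List Char) (n : Int) :
    posOf c (x :: t) n = if x = c then n :: posOf c t (n + 1) else posOf c t (n + 1) := by
  simp only [posOf, PySem.List.enumerate_cons, List.filter_cons]
  by_cases h : x = c <;> simp [h]

lemma posOf_ge (c : Char) (t : List Char) (n : Int) : ∀ m ∈ posOf c t n, n ≤ m := by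
  induction t generalizing n with
  | nil => simp [posOf_nil]
  | cons x t ih =>
    rw [posOf_cons]
    split
    · intro m hm
      rcases List.mem_cons.1 hm with rfl | hm'
      · exact le_refl _
      · exact le_trans (by omega) (ih (n + 1) m hm')
    · intro m hm; exact le_trans (by omega) (ih (n + 1) m hm)

lemma mem_of_mem_posOf {c : Char} {t : List Char} {k m : Int} (h : m ∈ posOf c t k) : c ∈ t := by
  induction t generalizing k with
  | nil => simp [posOf_nil] at h
  | cons y t ihy =>
    rw [posOf_cons] at h
    by_cases hy : y = c
    · simp [hy]
    · rw [if_neg hy] at h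
      exact .tail _ (ihy h)

lemma posOf_ne_nil_of_mem {c : Char} {t : List Char} {k : Int} (h : c ∈ t) : posOf c t k ≠ [] := by
  induction t generalizing k with
  | nil => simp at h
  | cons y t ihy =>
    rw [posOf_cons]
    rcases List.mem_cons.1 h with rfl | hmem
    · simp
    · by_cases hy : y = c
      · simp [hy]
      · rw [if_neg hy]; exact ihy hmem

-- THE BRIDGE: a gap in the index list of c ↔ enough run starts of c
lemma gap_iff_runStarts (c : Char) (s : List Char) (n : Int) (p : Option Char) :
    ¬ List.IsChain (fun a b => a = b - 1)
        (if p = some c then (n - 1) :: posOf c s n else posOf c s n)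
      ↔ (if p = some c then 1 else 2) ≤ (runStarts s p).count c := by
  induction s generalizing n p with
  | nil =>
    simp only [posOf_nil, runStarts, List.count_nil]
    split <;> simp
  | cons x t ih =>
    rw [posOf_cons]
    by_cases hsx : (some x : Option Char) = p
    · -- same character as prev: not a run start
      simp only [runStarts, if_pos hsx]
      by_cases hx : x = c
      · -- x = c and p = some c
        subst hx
        rw [if_pos hsx.symm, if_pos hsx.symm, if_pos rfl, ← hsx]
        have h1 : List.IsChain (fun a b : Int => a = b - 1) ((n - 1) :: n :: posOf x t (n + 1))
            ↔ List.IsChain (fun a b : Int => a = b - 1) (n :: posOf x t (n + 1)) := by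
          rw [List.isChain_cons_cons]
          exact ⟨And.right, fun h => ⟨by omega, h⟩⟩
        rw [h1]
        have := ih (n + 1) (some x)
        rw [if_pos rfl, if_pos rfl] at this
        simpa using this
      · -- x ≠ c, p = some x ≠ some c
        have hpc : p ≠ some c := by rw [← hsx]; simpa using hx
        rw [if_neg hx, if_neg hpc, if_neg hpc]
        have := ih (n + 1) p
        rw [if_neg hpc, if_neg hpc] at this
        exact this
    · -- a new run starts with x
      simp only [runStarts, if_neg hsx]
      by_cases hx : x = c
      · -- run start of c itself; p ≠ some c
        subst hx
        have hpc : p ≠ some x := fun h => hsx h.symm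
        rw [if_pos rfl, if_neg hpc, if_neg hpc, List.count_cons_self]
        have := ih (n + 1) (some x)
        rw [if_pos rfl, if_pos rfl] at this
        simp only [(by omega : (n : Int) + 1 - 1 = n)] at this
        rw [this]
        constructor <;> intro <;> omega
      · -- run start of some x ≠ c
        rw [if_neg hx, List.count_cons_of_ne hx]
        by_cases hpc : p = some c
        · rw [if_pos hpc, if_pos hpc]
          have hne : (some x : Option Char) ≠ some c := by simpa using hx
          constructor
          · intro hnc
            cases h : posOf c t (n + 1) with
            | nil => exact absurd (by simp [h]) hnc
            | cons m rest =>
              have hcmem : c ∈ t := mem_of_mem_posOf (k := n + 1) (m := m) (by simp [h])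
              have := List.count_pos_iff.2 ((mem_runStarts hne).2 hcmem)
              omega
          · intro hcount
            have hcmem : c ∈ runStarts t (some x) := List.count_pos_iff.1 (by omega)
            have hct : c ∈ t := subset_runStarts hcmem
            cases h : posOf c t (n + 1) with
            | nil => exact absurd h (posOf_ne_nil_of_mem hct)
            | cons m rest =>
              have hm : n + 1 ≤ m := posOf_ge c t (n + 1) m (by simp [h])
              rw [List.isChain_cons_cons]
              rintro ⟨h1, -⟩
              omega
        · rw [if_neg hpc, if_neg hpc]
          have := ih (n + 1) (some x)
          rw [if_neg (by simpa using hx), if_neg (by simpa using hx)] at this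
          exact this

-- B-side loop invariant
lemma solAltLoop_spec (s : List Char) (p : Option Char) (st out : PySem.Set Char)
    (hst : st.Nodup) (hout : out.Nodup) :
    (∀ c, c ∈ (solAltLoop s p st out).1 ↔ c ∈ st ∨ c ∈ runStarts s p) ∧
    (∀ c, c ∈ (solAltLoop s p st out).2 ↔
      c ∈ out ∨ (c ∈ st ∧ c ∈ runStarts s p) ∨ 2 ≤ (runStarts s p).count c) ∧
    (solAltLoop s p st out).1.Nodup ∧ (solAltLoop s p st out).2.Nodup := by
  induction s generalizing p st out with
  | nil =>
    simp [solAltLoop, runStarts, hst, hout]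
  | cons x t ih =>
    simp only [solAltLoop, runStarts]
    by_cases hx : (some x : Option Char) = p
    · rw [if_pos hx, if_pos hx, ← hx]
      exact ih (some x) st out hst hout
    · rw [if_neg hx, if_neg hx]
      by_cases hin : PySem.Set.contains st x
      · rw [if_pos hin]
        have hxm : x ∈ st := (PySem.Set.contains_iff _ _).1 hin
        obtain ⟨h1, h2, h3, h4⟩ := ih (some x) st (PySem.Set.add out x) hst (PySem.Set.nodup_add _ _ hout)
        refine ⟨fun c => ?_, fun c => ?_, h3, h4⟩
        · rw [h1 c]
          by_cases hc : c = x <;> simp [hc, hxm]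
        · rw [h2 c, PySem.Set.mem_add]
          by_cases hc : c = x
          · subst hc
            simp [hxm]
          · have hxc : x ≠ c := fun h => hc h.symm
            rw [List.count_cons_of_ne hxc]
            simp [hc]
      · rw [if_neg hin]
        have hxm : x ∉ st := fun h => hin ((PySem.Set.contains_iff _ _).2 h)
        obtain ⟨h1, h2, h3, h4⟩ := ih (some x) (PySem.Set.add st x) out (PySem.Set.nodup_add _ _ hst) hout
        refine ⟨fun c => ?_, fun c => ?_, h3, h4⟩
        · rw [h1 c, PySem.Set.mem_add]
          by_cases hc : c = x <;> simp [hc]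
        · rw [h2 c]
          by_cases hc : c = x
          · subst hc
            rw [List.count_cons_self]
            constructor
            · rintro (h|h|h)
              · exact Or.inl h
              · have := List.count_pos_iff.2 h.2
                exact Or.inr (Or.inr (by omega))
              · exact Or.inr (Or.inr (by omega))
            · rintro (h|h|h)
              · exact Or.inl h
              · exact absurd h.1 hxm
              · have hmem : c ∈ runStarts t (some c) := List.count_pos_iff.1 (by omega)
                have hadd : c ∈ PySem.Set.add st c := by simp [PySem.Set.mem_add]
                exact Or.inr (Or.inl ⟨hadd, hmem⟩)
          · have hxc : x ≠ c := fun h => hc h.symm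
            rw [List.count_cons_of_ne hxc, PySem.Set.mem_add]
            simp [hc]

-- A-side: getD of the index-building loop (keys and values swapped wrt the library lemma)
lemma getD_posLoop (l : List (Int × Char)) (d : PySem.Dict Char (List Int)) (c : Char) :
    (l.foldl (fun dd p => dd.modify p.2 [] (· ++ [p.1])) d).getD c []
      = d.getD c [] ++ (l.filter (fun p => p.2 == c)).map (·.1) := by
  induction l generalizing d with
  | nil => simp
  | cons p l ih =>
    simp only [List.foldl_cons, List.filter_cons, ih]
    by_cases h : p.2 = c
    · rw [PySem.Dict.getD_modify]
      simp [h]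
    · rw [PySem.Dict.getD_modify]
      simp [h, Ne.symm h]

lemma getD_initLoop (l : List Char) (d : PySem.Dict Char (List Int)) (c : Char)
    (hd : d.getD c [] = []) :
    (l.foldl (fun dd i => dd.insert i ([] : List Int)) d).getD c [] = [] := by
  induction l generalizing d with
  | nil => simpa
  | cons x l ih =>
    simp only [List.foldl_cons]
    apply ih
    rw [PySem.Dict.getD_insert]
    split <;> simp [hd]

-- a break in the indexed-pair scan of A's inner loop ↔ the index list is not consecutive
lemma gapList_iff (pos : List Int) :
    (∃ i : Int, i ∈ PySem.List.pyRange 0 ((pos.length : Int) - 1) 1 ∧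
       PySem.List.pyGetD pos i 0 ≠ PySem.List.pyGetD pos (i + 1) 0 - 1)
    ↔ ¬ List.IsChain (fun a b => a = b - 1) pos := by
  rw [List.isChain_iff_getElem]
  simp only [not_forall]
  constructor
  · rintro ⟨i, hi, hne⟩
    rw [PySem.List.mem_pyRange_one] at hi
    refine ⟨i.toNat, by omega, ?_⟩
    rw [PySem.List.pyGetD_eq_getElem pos 0 (by omega) (by omega),
        PySem.List.pyGetD_eq_getElem pos 0 (by omega) (by omega)] at hne
    simpa only [show (i + 1).toNat = i.toNat + 1 from by omega] using hne
  · rintro ⟨i, hi, hne⟩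
    refine ⟨(i : Int), PySem.List.mem_pyRange_one.2 ⟨by omega, by omega⟩, ?_⟩
    rw [PySem.List.pyGetD_eq_getElem pos 0 (by omega) (by omega),
        PySem.List.pyGetD_eq_getElem pos 0 (by omega) (by omega)]
    simpa using hne

-- membership in A's answer list
lemma mem_answer_iff (s : List Char) (c : Char)
    (d : PySem.Dict Char (List Int)) (hk : d.keys = PySem.Set.ofList s)
    (hv : ∀ k, d.getD k [] = posOf k s 0) :
    (c ∈ d.keys.foldl (fun ans k =>
      (PySem.List.pyRange 0 (((d.getD k []).length : Int) - 1) 1).foldl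
        (fun ans2 i =>
          if PySem.List.pyGetD (d.getD k []) i 0 ≠ PySem.List.pyGetD (d.getD k []) (i + 1) 0 - 1
          then ans2 ++ [k] else ans2) ans) ([] : List Char))
    ↔ c ∈ s ∧ ¬ List.IsChain (fun a b => a = b - 1) (posOf c s 0) := by
  have hrw : (fun (ans : List Char) (k : Char) =>
      (PySem.List.pyRange 0 (((d.getD k []).length : Int) - 1) 1).foldl
        (fun ans2 i =>
          if PySem.List.pyGetD (d.getD k []) i 0 ≠ PySem.List.pyGetD (d.getD k []) (i + 1) 0 - 1
          then ans2 ++ [k] else ans2) ans)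
      = fun ans k => ans ++ ((PySem.List.pyRange 0 (((d.getD k []).length : Int) - 1) 1).filter
          (fun i => decide (PySem.List.pyGetD (d.getD k []) i 0 ≠ PySem.List.pyGetD (d.getD k []) (i + 1) 0 - 1))).map
          (fun _ => k) :=
    funext fun ans => funext fun k => PySem.List.foldl_append_ite _ _ _ _
  rw [hrw, PySem.List.foldl_append_eq_flatMap, List.nil_append, List.mem_flatMap]
  simp only [hv]
  constructor
  · rintro ⟨k, hkmem, hcmem⟩
    obtain ⟨i, hi, rfl⟩ := List.mem_map.1 hcmem
    have hks : k ∈ s := by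
      rw [hk] at hkmem; exact (PySem.Set.mem_ofList s k).1 hkmem
    refine ⟨hks, ?_⟩
    obtain ⟨hi1, hi2⟩ := List.mem_filter.1 hi
    exact (gapList_iff (posOf k s 0)).1 ⟨i, hi1, of_decide_eq_true hi2⟩
  · rintro ⟨hcs, hgap⟩
    obtain ⟨i, hi, hne⟩ := (gapList_iff (posOf c s 0)).2 hgap
    exact ⟨c, by rw [hk]; exact (PySem.Set.mem_ofList s c).2 hcs,
      List.mem_map.2 ⟨i, List.mem_filter.2 ⟨hi, decide_eq_true hne⟩, rfl⟩⟩

-- ===== VERDICT (by name: the statement is the Claim_ definition above) =====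
theorem solution_spec : Claim_equal_solution := by
  intro input_string _
  unfold Spec_solution solution solution_alt
  simp only []
  set s := input_string.toList with hs
  -- the initial dict: keys = set(s), every value []
  have hd0 : ∀ c, ((PySem.Set.ofList s).foldl (fun d i => d.insert i ([] : List Int))
      PySem.Dict.empty).getD c [] = [] :=
    fun c => getD_initLoop _ _ c (PySem.Dict.getD_empty _ _)
  have hkeys0 : ((PySem.Set.ofList s).foldl (fun d i => d.insert i ([] : List Int))
      PySem.Dict.empty).keys = PySem.Set.ofList s := by
    rw [PySem.Dict.keys_foldl_insert (f := fun _ _ => ([] : List Int)), PySem.Dict.keys_empty]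
    rw [PySem.Set.update_nil_left, PySem.Set.ofList_ofList]
  -- the filled dict
  set d := (PySem.List.enumerate s 0).foldl (fun dd p => dd.modify p.2 [] (· ++ [p.1]))
      ((PySem.Set.ofList s).foldl (fun d i => d.insert i ([] : List Int)) PySem.Dict.empty) with hd
  have hk : d.keys = PySem.Set.ofList s := by
    rw [hd, PySem.Dict.keys_foldl_modify_key (key := fun p : Int × Char => p.2)
      (f := fun _ p => (· ++ [p.1])), hkeys0, PySem.List.map_snd_enumerate]
    rw [PySem.Set.update_eq_append_filter]
    have : List.filter (fun y => !(PySem.Set.ofList s).contains y) (PySem.Set.ofList s) = [] := by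
      rw [List.filter_eq_nil_iff]
      intro y hy
      simp [hy]
    rw [this, List.append_nil]
  have hv : ∀ k, d.getD k [] = posOf k s 0 := by
    intro k
    rw [hd, getD_posLoop, hd0, List.nil_append]
    rfl
  -- membership on both sides
  have hB := solAltLoop_spec s none PySem.Set.empty PySem.Set.empty List.nodup_nil List.nodup_nil
  have hmem : ∀ c, c ∈ PySem.Set.ofList (d.keys.foldl (fun ans k =>
      (PySem.List.pyRange 0 (((d.getD k []).length : Int) - 1) 1).foldl
        (fun ans2 i =>
          if PySem.List.pyGetD (d.getD k []) i 0 ≠ PySem.List.pyGetD (d.getD k []) (i + 1) 0 - 1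
          then ans2 ++ [k] else ans2) ans) ([] : List Char))
      ↔ c ∈ (solAltLoop s none PySem.Set.empty PySem.Set.empty).2 := by
    intro c
    rw [PySem.Set.mem_ofList, mem_answer_iff s c d hk hv, hB.2.1 c]
    have hbridge := gap_iff_runStarts c s 0 none
    rw [if_neg (by simp), if_neg (by simp)] at hbridge
    constructor
    · rintro ⟨-, hgap⟩
      exact Or.inr (Or.inr (hbridge.1 hgap))
    · rintro (h | h | h)
      · simp [PySem.Set.empty] at h
      · simp [PySem.Set.empty] at h
      · have h1 : c ∈ runStarts s none :=
          List.count_pos_iff.1 (show 0 < (runStarts s none).count c by omega)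
        exact ⟨subset_runStarts h1, hbridge.2 h⟩
  have hperm : (PySem.Set.ofList (d.keys.foldl (fun ans k =>
      (PySem.List.pyRange 0 (((d.getD k []).length : Int) - 1) 1).foldl
        (fun ans2 i =>
          if PySem.List.pyGetD (d.getD k []) i 0 ≠ PySem.List.pyGetD (d.getD k []) (i + 1) 0 - 1
          then ans2 ++ [k] else ans2) ans) ([] : List Char))).Perm
      (solAltLoop s none PySem.Set.empty PySem.Set.empty).2 := by
    rw [List.perm_ext_iff_of_nodup (PySem.Set.nodup_ofList _) hB.2.2.2]
    exact hmem
  have hA2nil : PySem.Set.ofList (d.keys.foldl (fun ans k =>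
      (PySem.List.pyRange 0 (((d.getD k []).length : Int) - 1) 1).foldl
        (fun ans2 i =>
          if PySem.List.pyGetD (d.getD k []) i 0 ≠ PySem.List.pyGetD (d.getD k []) (i + 1) 0 - 1
          then ans2 ++ [k] else ans2) ans) ([] : List Char)) = []
      ↔ (solAltLoop s none PySem.Set.empty PySem.Set.empty).2 = [] := by
    constructor
    · intro h
      have h' := hperm
      rw [h] at h'
      exact (h'.symm).eq_nil
    · intro h
      have h' := hperm
      rw [h] at h'
      exact h'.eq_nil
  by_cases hnil : (solAltLoop s none PySem.Set.empty PySem.Set.empty).2 = []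
  · rw [if_pos hnil, if_pos (by rw [List.length_eq_zero_iff]; exact hA2nil.2 hnil)]
  · rw [if_neg hnil, if_neg (by rw [List.length_eq_zero_iff]; exact fun h => hnil (hA2nil.1 h))]
    congr 1
    exact PySem.List.sorted_eq_sorted_of_perm _ _ _ (fun a b h => h) hperm
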